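-- pv_equiv track=rewrite | github.com/Donggyu-Kim1/coding_practice | 프로그래머스/0/120890. 가까운 수/가까운 수.py | solution
-- ===== SOURCE A (Python) =====
-- def solution(array, n):
--     answer = {}
--     for i in array:
--         answer[i] = abs(n - i)
--
--     min_values = min(answer.values())
--     min_keys = []
--
--     for k, v in answer.items():
--         if v == min_values:
--             min_keys.append(k)
--
--     return min(min_keys)
-- ===== SOURCE B (Python) =====
-- def solution(array, n):
--     return min(array, key=lambda x: (abs(n - x), x))
-- ===== Notes on version B (the rewrite author's own statement) =====
-- stated objective: idiomatic
-- what changed: Replaces the dict of distances, the separate minimum-of-values pass and the tie-collecting pass with a single lexicographic argmin pass: min(array, key=lambda x: (abs(n-x), x)); one pass and no dict allocation is the constant-factor gain.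
import Mathlib
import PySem

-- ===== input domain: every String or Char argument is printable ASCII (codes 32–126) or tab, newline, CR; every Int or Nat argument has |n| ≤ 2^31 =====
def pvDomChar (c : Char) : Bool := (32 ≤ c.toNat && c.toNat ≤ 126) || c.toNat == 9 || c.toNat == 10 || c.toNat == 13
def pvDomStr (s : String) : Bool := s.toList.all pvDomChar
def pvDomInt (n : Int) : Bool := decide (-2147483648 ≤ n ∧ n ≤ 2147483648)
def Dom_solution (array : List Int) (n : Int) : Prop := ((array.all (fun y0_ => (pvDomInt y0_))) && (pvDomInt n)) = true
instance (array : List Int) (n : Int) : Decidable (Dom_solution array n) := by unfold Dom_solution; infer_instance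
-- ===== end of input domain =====

-- B replaces A's distance dict and two extra passes by one lexicographic argmin pass (idiomatic min with a key).

-- ===== PORT A =====
-- Literal port of A: build the dict i ↦ abs(n-i), take min of values, collect keys
-- with that value, return their min.  Python's min raises on an empty sequence;
-- the port's `.getD 0` is reached only there, and Pre_solution excludes that input.
def solution (array : List Int) (n : Int) : Int :=
  let answer : PySem.Dict Int Int :=
    array.foldl (fun d i => d.insert i (|n - i|)) PySem.Dict.empty
  let min_values : Int := (PySem.List.min? answer.values (fun v => v)).getD 0
  let min_keys : List Int :=
    answer.items.foldl (fun acc kv => if kv.2 = min_values then acc ++ [kv.1] else acc) []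
  (PySem.List.min? min_keys (fun k => k)).getD 0

-- ===== PORT B =====
-- min(array, key=lambda x: (abs(n - x), x)); Python's min raises on [], the
-- `.getD 0` default is reached only outside Pre_solution.
def solution_alt (array : List Int) (n : Int) : Int :=
  (PySem.List.min2? array (fun x => |n - x|) (fun x => x)).getD 0

-- ===== PRECONDITION & SPEC =====
-- Python's min raises ValueError on the empty array in both A and B.
def Pre_solution (array : List Int) (n : Int) : Prop := array ≠ []
instance (array : List Int) (n : Int) : Decidable (Pre_solution array n) := by unfold Pre_solution; infer_instance
def pvWitness_solution : List Int × Int := ([3, 1, 7], 4)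

def Spec_solution (array : List Int) (n : Int) (out : Int) : Prop := out = solution_alt array n
instance (array : List Int) (n : Int) (out : Int) : Decidable (Spec_solution array n out) := by unfold Spec_solution; infer_instance

-- ===== CLAIM (what is proved, stated in full; the proofs are below) =====
def Claim_equal_solution : Prop := ∀ (array : List Int) (n : Int), Dom_solution array n → Pre_solution array n → Spec_solution array n (solution array n)

-- ===== LEMMAS AND PROOFS =====

-- The common specification: m is the element of `array` with lexicographically
-- minimal (|n - m|, m).
def IsBest (array : List Int) (n m : Int) : Prop :=
  m ∈ array ∧ ∀ x ∈ array, |n - m| ≤ |n - x| ∧ (|n - x| ≤ |n - m| → m ≤ x)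

theorem isBest_unique {array : List Int} {n m₁ m₂ : Int}
    (h₁ : IsBest array n m₁) (h₂ : IsBest array n m₂) : m₁ = m₂ := by
  obtain ⟨hm₁, hb₁⟩ := h₁
  obtain ⟨hm₂, hb₂⟩ := h₂
  obtain ⟨le₁, tie₁⟩ := hb₁ m₂ hm₂
  obtain ⟨le₂, tie₂⟩ := hb₂ m₁ hm₁
  exact le_antisymm (tie₁ le₂) (tie₂ le₁)

-- The dict built by A: looking up any key that occurs in xs gives |n - key|.
theorem getD_foldl_insert_abs (n : Int) :
    ∀ (xs : List Int) (d : PySem.Dict Int Int) (k dflt : Int),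
      (xs.foldl (fun d i => d.insert i (|n - i|)) d).getD k dflt
        = if k ∈ xs then |n - k| else d.getD k dflt := by
  intro xs
  induction xs with
  | nil => intro d k dflt; simp
  | cons x t ih =>
    intro d k dflt
    simp only [List.foldl_cons, ih, List.mem_cons]
    by_cases hk : k ∈ t
    · simp [hk]
    · by_cases hx : k = x
      · subst hx; simp [hk, PySem.Dict.getD_insert_self]
      · simp only [hk, hx, or_false, if_false]
        exact PySem.Dict.getD_insert_of_ne d _ _ hx

-- The loop body of min2?, named so the invariant can be stated about it.
def lexStep (k : Int → Int) (acc : Option Int) (x : Int) : Option Int :=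
  match acc with
  | none => some x
  | some c =>
    if (decide (k x < k c) || !decide (k c < k x) && decide (x < c)) = true
    then some x else some c

theorem min2?_eq_foldl_lexStep (k : Int → Int) (xs : List Int) :
    PySem.List.min2? xs k (fun x => x) = xs.foldl (lexStep k) none := by
  unfold PySem.List.min2?
  congr 1
  funext acc x
  cases acc <;> simp [lexStep]

-- Invariant of B's single pass: the accumulator is the lexicographic argmin
-- of everything seen so far.
theorem lexStep_foldl_best (k : Int → Int) :
    ∀ (xs : List Int) (a : Int), ∃ m, xs.foldl (lexStep k) (some a) = some m ∧
      (m = a ∨ m ∈ xs) ∧ ∀ x, (x = a ∨ x ∈ xs) → k m ≤ k x ∧ (k x ≤ k m → m ≤ x) := by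
  intro xs
  induction xs with
  | nil =>
    intro a
    refine ⟨a, by simp, Or.inl rfl, ?_⟩
    rintro x (rfl | hx)
    · exact ⟨le_refl _, fun _ => le_refl _⟩
    · simp at hx
  | cons y t ih =>
    intro a
    by_cases hc : k y < k a ∨ (¬ k a < k y ∧ y < a)
    · have hb : (decide (k y < k a) || !decide (k a < k y) && decide (y < a)) = true := by
        simp only [Bool.or_eq_true, Bool.and_eq_true, Bool.not_eq_true',
          decide_eq_true_eq, decide_eq_false_iff_not]
        exact hc
      have hstep : lexStep k (some a) y = some y := by simp [lexStep, hb]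
      obtain ⟨m, hm, hmem, hbest⟩ := ih y
      refine ⟨m, by rw [List.foldl_cons, hstep]; exact hm, ?_, ?_⟩
      · rcases hmem with rfl | hmem
        · exact Or.inr List.mem_cons_self
        · exact Or.inr (List.mem_cons_of_mem _ hmem)
      · have hya : k y ≤ k a := by
          rcases hc with h3 | ⟨h3, _⟩
          · exact le_of_lt h3
          · exact not_lt.mp h3
        rintro x (rfl | hx)
        · obtain ⟨h1, h2⟩ := hbest y (Or.inl rfl)
          refine ⟨le_trans h1 hya, fun hle => ?_⟩
          rcases hc with h3 | ⟨h3, h4⟩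
          · exact absurd (lt_of_lt_of_le h3 (le_trans hle h1)) (lt_irrefl _)
          · exact le_trans (h2 (le_trans hya hle)) (le_of_lt h4)
        · rcases List.mem_cons.mp hx with rfl | hx'
          · exact hbest x (Or.inl rfl)
          · exact hbest x (Or.inr hx')
    · rw [not_or] at hc
      obtain ⟨hc1, hc2⟩ := hc
      have hb : ¬ ((decide (k y < k a) || !decide (k a < k y) && decide (y < a)) = true) := by
        simp only [Bool.or_eq_true, Bool.and_eq_true, Bool.not_eq_true',
          decide_eq_true_eq, decide_eq_false_iff_not]
        rw [not_or]
        exact ⟨hc1, hc2⟩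
      have hstep : lexStep k (some a) y = some a := by simp [lexStep, hb]
      obtain ⟨m, hm, hmem, hbest⟩ := ih a
      refine ⟨m, by rw [List.foldl_cons, hstep]; exact hm, hmem.imp id (List.mem_cons_of_mem _), ?_⟩
      rintro x (rfl | hx)
      · exact hbest x (Or.inl rfl)
      · rcases List.mem_cons.mp hx with rfl | hx'
        · obtain ⟨h1, h2⟩ := hbest a (Or.inl rfl)
          refine ⟨le_trans h1 (not_lt.mp hc1), fun hle => ?_⟩
          have hma : m ≤ a := h2 (le_trans (not_lt.mp hc1) hle)
          have h5 : ¬ k a < k x := not_lt.mpr (le_trans hle h1)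
          have h6 : a ≤ x := not_lt.mp (not_and.mp hc2 h5)
          exact le_trans hma h6
        · exact hbest x (Or.inr hx')

theorem solution_alt_isBest {array : List Int} {n : Int} (h : array ≠ []) :
    IsBest array n (solution_alt array n) := by
  obtain ⟨y, t, rfl⟩ := List.exists_cons_of_ne_nil h
  obtain ⟨m, hm, hmem, hbest⟩ := lexStep_foldl_best (fun x => |n - x|) t y
  have hval : solution_alt (y :: t) n = m := by
    unfold solution_alt
    rw [min2?_eq_foldl_lexStep, List.foldl_cons,
      show lexStep (fun x => |n - x|) none y = some y from rfl, hm]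
    rfl
  rw [hval]
  constructor
  · rcases hmem with rfl | hmem
    · exact List.mem_cons_self
    · exact List.mem_cons_of_mem _ hmem
  · intro x hx
    rcases List.mem_cons.mp hx with rfl | hx'
    · exact hbest x (Or.inl rfl)
    · exact hbest x (Or.inr hx')

theorem solution_isBest {array : List Int} {n : Int} (h : array ≠ []) :
    IsBest array n (solution array n) := by
  unfold solution
  set f : Int → Int := fun i => |n - i| with hf
  set answer : PySem.Dict Int Int :=
    array.foldl (fun d i => d.insert i (|n - i|)) PySem.Dict.empty with hans
  set L : List Int := PySem.List.dedup array with hL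
  have hkeys : answer.keys = L := by
    rw [hans, PySem.Dict.keys_foldl_insert_key array (fun i => i) (fun _ i => |n - i|)]
    rw [hL]
    simp only [PySem.Dict.keys_empty, List.map_id']
    rfl
  have hnodup : answer.keys.Nodup := by rw [hkeys, hL]; exact PySem.List.nodup_dedup array
  have hgetD : ∀ k ∈ L, answer.getD k 0 = f k := by
    intro k hk
    rw [hans, getD_foldl_insert_abs n array PySem.Dict.empty k 0,
      if_pos ((PySem.List.mem_dedup array k).mp (hL ▸ hk))]
  have hitems : answer.items = L.map (fun k => (k, f k)) := by
    rw [PySem.Dict.items_eq_map_keys answer hnodup 0, hkeys]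
    exact List.map_congr_left fun k hk => by rw [hgetD k hk]
  have hvalues : answer.values = L.map f := by
    rw [PySem.Dict.values_eq_map_keys answer hnodup 0, hkeys]
    exact List.map_congr_left fun k hk => hgetD k hk
  have hLne : L ≠ [] := by
    rw [hL]
    intro hnil
    rcases array with _ | ⟨y, t⟩
    · exact h rfl
    · have hy : y ∈ PySem.List.dedup (y :: t) :=
        (PySem.List.mem_dedup _ y).mpr List.mem_cons_self
      rw [hnil] at hy
      simp at hy
  -- the minimum distance
  rcases hm0 : PySem.List.min? answer.values (fun v => v) with _ | m0
  · exact absurd ((PySem.List.min?_eq_none_iff _ _).mp hm0)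
      (by rw [hvalues]; simpa using hLne)
  have hm0mem : m0 ∈ answer.values := PySem.List.min?_mem hm0
  have hm0min : ∀ v ∈ answer.values, m0 ≤ v := PySem.List.min?_isMin hm0
  rw [hvalues] at hm0mem hm0min
  obtain ⟨k0, hk0L, hk0⟩ := List.mem_map.mp hm0mem
  -- min_keys = the keys carrying the minimal distance
  have hmk : answer.items.foldl
      (fun acc kv => if kv.2 = (some m0).getD 0 then acc ++ [kv.1] else acc) []
      = L.filter (fun k => decide (f k = m0)) := by
    rw [show (fun (acc : List Int) (kv : Int × Int) =>
        if kv.2 = (some m0).getD 0 then acc ++ [kv.1] else acc)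
        = (fun acc kv => if (decide (kv.2 = m0)) = true then acc ++ [kv.1] else acc) from by
      funext acc kv; simp]
    rw [PySem.List.foldl_append_if, hitems, List.filter_map, List.map_map]
    simp [Function.comp_def]
  show IsBest array n ((PySem.List.min? (List.foldl
      (fun acc kv => if kv.2 = (PySem.List.min? answer.values (fun v => v)).getD 0
        then acc ++ [kv.1] else acc) [] answer.items) (fun k => k)).getD 0)
  rw [hm0, hmk]
  rcases hmin : PySem.List.min? (L.filter (fun k => decide (f k = m0))) (fun k => k) with _ | m
  · exfalso
    have := (PySem.List.min?_eq_none_iff _ _).mp hmin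
    rw [List.filter_eq_nil_iff] at this
    exact this k0 hk0L (by simp [hk0])
  have hmmem := PySem.List.min?_mem hmin
  have hmmin := PySem.List.min?_isMin hmin
  have hmfil := List.mem_filter.mp hmmem
  have hmL : m ∈ L := hmfil.1
  have hmval : f m = m0 := by simpa using hmfil.2
  simp only [Option.getD_some]
  constructor
  · exact (PySem.List.mem_dedup array m).mp (hL ▸ hmL)
  · intro x hx
    have hxL : x ∈ L := hL ▸ (PySem.List.mem_dedup array x).mpr hx
    have hfx : m0 ≤ f x := hm0min (f x) (List.mem_map.mpr ⟨x, hxL, rfl⟩)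
    refine ⟨le_of_eq_of_le hmval hfx, fun hle => ?_⟩
    have hlef : f x ≤ f m := hle
    have hxm0 : f x = m0 := le_antisymm (hmval ▸ hlef) hfx
    exact hmmin x (List.mem_filter.mpr ⟨hxL, by simp [hxm0]⟩)

-- ===== VERDICT (by name: the statement is the Claim_ definition above) =====
theorem solution_spec : Claim_equal_solution := by
  intro array n _ hpre
  unfold Spec_solution
  exact isBest_unique (solution_isBest hpre) (solution_alt_isBest hpre)
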